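-- pv_equiv track=rewrite | github.com/zyalhor1961/corematch-web | python-service/services/shark_scoring_service.py | score_organizations
-- ===== SOURCE A (Python) =====
-- from typing import Optional, List, Dict, Any, Tuple
--
-- ORG_ROLE_SCORES = {
--     "MOA": 15,
--     "MOE": 10,
--     "General_Contractor": 10,
--     "Subcontractor": 5,
--     "Operator": 5,
--     "Other": 2,
-- }
--
-- def score_organizations(orgs: List[Dict[str, Any]]) -> Tuple[int, Dict[str, int]]:
--     """
--     Calculate points from organizations.
--
--     Returns:
--         Tuple of (total_points, breakdown_by_role)
--     """
--     total = 0
--     breakdown = {}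
--     seen_roles = set()
--
--     for org in orgs:
--         role = org.get("role_in_project") or org.get("org_type") or "Other"
--
--         # Only count each role type once
--         if role not in seen_roles:
--             points = ORG_ROLE_SCORES.get(role, ORG_ROLE_SCORES["Other"])
--             total += points
--             breakdown[role] = points
--             seen_roles.add(role)
--
--     return total, breakdown
-- ===== SOURCE B (Python) =====
-- from typing import Optional, List, Dict, Any, Tuple
--
-- ORG_ROLE_SCORES = {
--     "MOA": 15,
--     "MOE": 10,
--     "General_Contractor": 10,
--     "Subcontractor": 5,
--     "Operator": 5,
--     "Other": 2,
-- }
--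
-- def score_organizations(orgs: List[Dict[str, Any]]) -> Tuple[int, Dict[str, int]]:
--     """Divide and conquer: score each half independently, then merge the two
--     half-results, keeping only right-half roles not already seen on the left."""
--     def solve(lo, hi):
--         n = hi - lo
--         if n == 0:
--             return 0, {}
--         if n == 1:
--             org = orgs[lo]
--             role = org.get("role_in_project") or org.get("org_type") or "Other"
--             pts = ORG_ROLE_SCORES.get(role, ORG_ROLE_SCORES["Other"])
--             return pts, {role: pts}
--         mid = lo + n // 2
--         total, merged_left = solve(lo, mid)
--         _, rb = solve(mid, hi)
--         merged = dict(merged_left)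
--         for role, pts in rb.items():
--             if role not in merged_left:
--                 merged[role] = pts
--                 total += pts
--         return total, merged
--     return solve(0, len(orgs))
-- ===== Notes on version B (the rewrite author's own statement) =====
-- stated objective: alternative
-- what changed: A's single forward pass carrying a running total, a breakdown dict and a seen-roles set is replaced by divide-and-conquer: each half of the list is scored recursively and the two half-breakdowns are merged, adding only right-half roles not already present on the left.
import Mathlib
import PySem

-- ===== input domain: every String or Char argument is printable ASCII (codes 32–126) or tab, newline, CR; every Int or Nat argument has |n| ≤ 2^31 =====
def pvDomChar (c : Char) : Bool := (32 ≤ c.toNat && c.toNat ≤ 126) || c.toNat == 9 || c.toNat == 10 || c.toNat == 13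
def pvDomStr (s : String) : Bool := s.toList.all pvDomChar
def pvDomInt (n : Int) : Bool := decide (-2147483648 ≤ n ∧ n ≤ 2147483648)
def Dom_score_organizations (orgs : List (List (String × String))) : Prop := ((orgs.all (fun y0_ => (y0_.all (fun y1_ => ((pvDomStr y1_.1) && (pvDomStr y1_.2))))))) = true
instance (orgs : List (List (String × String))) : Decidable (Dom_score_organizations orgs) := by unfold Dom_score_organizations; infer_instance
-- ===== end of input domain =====

-- B replaces A's single forward seen-set pass by divide-and-conquer: score each half recursively, merge the breakdowns (alternative decomposition, same result).

-- shared module constant ORG_ROLE_SCORES (a dict literal)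
def ORG_ROLE_SCORES : PySem.Dict String Int :=
  PySem.Dict.ofList [("MOA", 15), ("MOE", 10), ("General_Contractor", 10),
                     ("Subcontractor", 5), ("Operator", 5), ("Other", 2)]

-- org.get(k): the org dict is an association list, lookup = first match
def orgGet (org : List (String × String)) (k : String) : Option String :=
  (org.find? (fun p => p.1 == k)).map (·.2)

-- role = org.get("role_in_project") or org.get("org_type") or "Other"
-- ('or' takes the next operand when the value is missing (None) or the empty string, Python's falsy strings)
def roleOf (org : List (String × String)) : String :=
  match orgGet org "role_in_project" with
  | some s => if s ≠ "" then s else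
      match orgGet org "org_type" with
      | some t => if t ≠ "" then t else "Other"
      | none => "Other"
  | none =>
      match orgGet org "org_type" with
      | some t => if t ≠ "" then t else "Other"
      | none => "Other"

-- ===== PORT A =====
-- A's loop: one pass, state = (total, breakdown dict, seen set)
def score_organizations (orgs : List (List (String × String))) : Int × (List (String × Int)) :=
  let st := orgs.foldl
    (fun (st : Int × PySem.Dict String Int × PySem.Set String) org =>
      let role := roleOf org
      if st.2.2.contains role then st
      else
        let points := ORG_ROLE_SCORES.getD role (ORG_ROLE_SCORES.getD "Other" 0)
        (st.1 + points, st.2.1.insert role points, PySem.Set.add st.2.2 role))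
    (0, PySem.Dict.empty, PySem.Set.empty)
  (st.1, st.2.1.items)

-- ===== PORT B =====
-- B's recursion solve(lo, hi), ported as recursion on the sublist (take/drop = the index halves):
-- empty slice → (0, {}); one org → its role's score; otherwise score both halves and merge,
-- adding only right-half roles not already in the left breakdown.
def solveB (l : List (List (String × String))) : Int × PySem.Dict String Int :=
  match l with
  | [] => (0, PySem.Dict.empty)
  | [org] =>
      let role := roleOf org
      let pts := ORG_ROLE_SCORES.getD role (ORG_ROLE_SCORES.getD "Other" 0)
      (pts, PySem.Dict.empty.insert role pts)
  | a :: b :: rest =>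
      let l' := a :: b :: rest
      let mid := l'.length / 2
      let left := solveB (l'.take mid)
      let right := solveB (l'.drop mid)
      right.2.items.foldl
        (fun (acc : Int × PySem.Dict String Int) p =>
          if left.2.contains p.1 then acc else (acc.1 + p.2, acc.2.insert p.1 p.2))
        (left.1, left.2)
termination_by l.length
decreasing_by
  all_goals simp [List.length_take, List.length_drop]
  all_goals omega

def score_organizations_alt (orgs : List (List (String × String))) : Int × (List (String × Int)) :=
  let r := solveB orgs
  (r.1, r.2.items)

-- ===== PRECONDITION & SPEC =====
def Spec_score_organizations (orgs : List (List (String × String))) (out : Int × (List (String × Int))) : Prop := out = score_organizations_alt orgs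
instance (orgs : List (List (String × String))) (out : Int × (List (String × Int))) : Decidable (Spec_score_organizations orgs out) := by unfold Spec_score_organizations; infer_instance

-- ===== CLAIM (what is proved, stated in full; the proofs are below) =====
def Claim_equal_score_organizations : Prop := ∀ (orgs : List (List (String × String))), Dom_score_organizations orgs → Spec_score_organizations orgs (score_organizations orgs)

-- ===== LEMMAS AND PROOFS =====

-- the per-role score used by both ports
def scoreOf (role : String) : Int :=
  ORG_ROLE_SCORES.getD role (ORG_ROLE_SCORES.getD "Other" 0)

-- the roles A's loop actually adds, given the roles list and the seen set so far
def newRoles (s : PySem.Set String) : List String → List String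
  | [] => []
  | r :: rs => if s.contains r then newRoles s rs else r :: newRoles (s ++ [r]) rs

-- A's loop body, abstracted over the role (not the org)
def stepA (st : Int × PySem.Dict String Int × PySem.Set String) (role : String) :
    Int × PySem.Dict String Int × PySem.Set String :=
  if st.2.2.contains role then st
  else (st.1 + scoreOf role, st.2.1.insert role (scoreOf role), PySem.Set.add st.2.2 role)

lemma loopA_eq (rs : List String) :
    ∀ (t : Int) (d : PySem.Dict String Int) (s : PySem.Set String),
    rs.foldl stepA (t, d, s) =
      ( t + ((newRoles s rs).map scoreOf).sum
      , (newRoles s rs).foldl (fun d' r => d'.insert r (scoreOf r)) d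
      , s ++ newRoles s rs ) := by
  induction rs with
  | nil => intro t d s; simp [newRoles]
  | cons r rs ih =>
    intro t d s
    by_cases h : r ∈ s
    · simp [List.foldl, stepA, h, newRoles, ih]
    · simp [List.foldl, stepA, h, newRoles, PySem.Set.add, ih, add_assoc]

lemma nodup_fresh_newRoles (rs : List String) :
    ∀ s : PySem.Set String, (newRoles s rs).Nodup ∧ ∀ r ∈ newRoles s rs, r ∉ s := by
  induction rs with
  | nil => intro s; simp [newRoles]
  | cons r rs ih =>
    intro s
    by_cases h : r ∈ s
    · simpa [newRoles, h] using ih s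
    · obtain ⟨hn, hf⟩ := ih (s ++ [r])
      have hr : r ∉ newRoles (s ++ [r]) rs := fun hm => hf r hm (by simp)
      refine ⟨by simp [newRoles, h, List.nodup_cons, hr, hn], ?_⟩
      intro x hx
      have hx' : x = r ∨ x ∈ newRoles (s ++ [r]) rs := by simpa [newRoles, h] using hx
      rcases hx' with rfl | hx
      · exact h
      · exact fun hm => hf x hx (by simp [hm])

lemma items_foldl_insert (roles : List String) :
    ∀ d : PySem.Dict String Int, roles.Nodup → (∀ r ∈ roles, d.contains r = false) →
    (roles.foldl (fun d' r => d'.insert r (scoreOf r)) d).items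
      = d.items ++ roles.map (fun r => (r, scoreOf r)) := by
  induction roles with
  | nil => intro d _ _; simp
  | cons r roles ih =>
    intro d hn hf
    have hfr : d.contains r = false := hf r (by simp)
    have step : (d.insert r (scoreOf r)).items = d.items ++ [(r, scoreOf r)] :=
      PySem.Dict.items_insert_of_not_contains d _ hfr
    have hrest : ∀ x ∈ roles, (d.insert r (scoreOf r)).contains x = false := by
      intro x hx
      rw [PySem.Dict.contains_insert]
      have hxr : x ≠ r := fun e => (List.nodup_cons.1 hn).1 (e ▸ hx)
      simp [hxr, hf x (List.mem_cons_of_mem _ hx)]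
    simp [List.foldl, ih _ (List.nodup_cons.1 hn).2 hrest, step]

-- splitting the role list splits newRoles
lemma newRoles_append (a : List String) :
    ∀ (b : List String) (s : PySem.Set String),
    newRoles s (a ++ b) = newRoles s a ++ newRoles (s ++ newRoles s a) b := by
  induction a with
  | nil => intro b s; simp [newRoles]
  | cons r a ih =>
    intro b s
    by_cases h : r ∈ s
    · simp [newRoles, h, ih]
    · simp [newRoles, h, ih, List.append_assoc]

-- the fresh roles relative to a seen set are the fresh-from-scratch roles minus the seen ones
lemma newRoles_seen_filter (rs : List String) :
    ∀ s : PySem.Set String,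
    newRoles s rs = (newRoles [] rs).filter (fun x => decide (x ∉ s)) := by
  induction rs with
  | nil => intro s; simp [newRoles]
  | cons r rs ih =>
    intro s
    have e1 : newRoles ([] : PySem.Set String) (r :: rs) = r :: newRoles [r] rs := by
      simp [newRoles]
    rw [e1, List.filter_cons]
    by_cases h : r ∈ s
    · simp only [show (decide (r ∉ s)) = false by simp [h], Bool.false_eq_true, if_false]
      rw [show newRoles s (r :: rs) = newRoles s rs from by simp [newRoles, h],
          ih s, ih [r], List.filter_filter]
      refine List.filter_congr (fun x _ => ?_)
      by_cases hx : x ∈ s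
      · simp [hx]
      · have hxr : x ≠ r := fun e => hx (e ▸ h)
        simp [hx, hxr]
    · rw [show newRoles s (r :: rs) = r :: newRoles (s ++ [r]) rs from by simp [newRoles, h]]
      simp only [show (decide (r ∉ s)) = true by simp [h], if_true]
      rw [ih (s ++ [r]), ih [r], List.filter_filter]
      refine congrArg (r :: ·) ?_
      exact List.filter_congr (fun x _ => by
        by_cases hx : x ∈ s <;> by_cases hxr : x = r <;> simp [hx, hxr])

-- B's merge loop over the right-half items, with a FIXED membership test against the left dict
lemma merge_fold (d0 : PySem.Dict String Int) (ps : List (String × Int)) :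
    ∀ (t : Int) (d : PySem.Dict String Int),
    (ps.map (·.1)).Nodup →
    (∀ p ∈ ps, d0.contains p.1 = false → d.contains p.1 = false) →
    (ps.foldl
      (fun (acc : Int × PySem.Dict String Int) p =>
        if d0.contains p.1 then acc else (acc.1 + p.2, acc.2.insert p.1 p.2))
      (t, d)).1
    = t + ((ps.filter (fun p => !(d0.contains p.1))).map (·.2)).sum
    ∧
    (ps.foldl
      (fun (acc : Int × PySem.Dict String Int) p =>
        if d0.contains p.1 then acc else (acc.1 + p.2, acc.2.insert p.1 p.2))
      (t, d)).2.items
    = d.items ++ ps.filter (fun p => !(d0.contains p.1)) := by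
  induction ps with
  | nil => intro t d _ _; simp
  | cons p ps ih =>
    intro t d hnd hfresh
    rw [List.map_cons, List.nodup_cons] at hnd
    by_cases h : d0.contains p.1
    · have hrec := ih t d hnd.2 (fun q hq => hfresh q (List.mem_cons_of_mem _ hq))
      rw [List.foldl_cons, if_pos h]
      refine ⟨?_, ?_⟩
      · rw [hrec.1]; simp [h]
      · rw [hrec.2]; simp [h]
    · have hdp : d.contains p.1 = false := hfresh p (by simp) (by simp [h])
      have hitems : (d.insert p.1 p.2).items = d.items ++ [p] := by
        simpa using PySem.Dict.items_insert_of_not_contains d p.2 hdp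
      have hfresh' : ∀ q ∈ ps, d0.contains q.1 = false →
          (d.insert p.1 p.2).contains q.1 = false := by
        intro q hq hq0
        rw [PySem.Dict.contains_insert]
        have hne : q.1 ≠ p.1 := fun e => hnd.1 (e ▸ List.mem_map_of_mem hq)
        simp [hne, hfresh q (List.mem_cons_of_mem _ hq) hq0]
      have hrec := ih (t + p.2) (d.insert p.1 p.2) hnd.2 hfresh'
      rw [List.foldl_cons, if_neg h]
      refine ⟨?_, ?_⟩
      · rw [hrec.1]; simp [h, add_assoc]
      · rw [hrec.2, hitems]; simp [h]

-- solveB computes the first-seen roles of its slice, scored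
lemma solveB_spec : ∀ (n : Nat) (l : List (List (String × String))), l.length ≤ n →
    (solveB l).1 = ((newRoles [] (l.map roleOf)).map scoreOf).sum ∧
    (solveB l).2.items = (newRoles [] (l.map roleOf)).map (fun r => (r, scoreOf r)) := by
  intro n
  induction n with
  | zero =>
    intro l hl
    have : l = [] := List.eq_nil_of_length_eq_zero (Nat.le_zero.1 hl)
    subst this
    simp [solveB, newRoles, PySem.Dict.empty]
  | succ n ih =>
    intro l hl
    match l with
    | [] => simp [solveB, newRoles, PySem.Dict.empty]
    | [org] =>
      refine ⟨by simp [solveB, newRoles, scoreOf], ?_⟩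
      simp only [solveB]
      rw [PySem.Dict.items_insert_of_not_contains _ _ (PySem.Dict.contains_empty _)]
      simp [newRoles, scoreOf, PySem.Dict.empty]
    | a :: b :: rest =>
      set L : List (List (String × String)) := a :: b :: rest with hL
      have hlen2 : 2 ≤ L.length := by simp [hL]
      set mid := L.length / 2 with hmid
      have hmid1 : 1 ≤ mid := by omega
      have hmidlt : mid < L.length := by omega
      have htake : (L.take mid).length ≤ n := by
        have : (L.take mid).length = mid := by simp [List.length_take]; omega
        have hLn : L.length ≤ n + 1 := hl
        omega
      have hdrop : (L.drop mid).length ≤ n := by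
        have : (L.drop mid).length = L.length - mid := by simp [List.length_drop]
        have hLn : L.length ≤ n + 1 := hl
        omega
      obtain ⟨hl1, hl2⟩ := ih (L.take mid) htake
      obtain ⟨hr1, hr2⟩ := ih (L.drop mid) hdrop
      set m1 := (L.take mid).map roleOf with hm1
      set m2 := (L.drop mid).map roleOf with hm2
      set u1 := newRoles [] m1 with hu1
      set u2 := newRoles [] m2 with hu2
      have hsplit : L.map roleOf = m1 ++ m2 := by
        rw [hm1, hm2, ← List.map_append, List.take_append_drop]
      -- keys of the left dict are u1
      have hkeys : (solveB (L.take mid)).2.keys = u1 := by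
        show ((solveB (L.take mid)).2.items).map (·.1) = u1
        rw [hl2]; simp [Function.comp_def]
      have hnodupu1 : u1.Nodup := (nodup_fresh_newRoles m1 []).1
      have hnodupu2 : u2.Nodup := (nodup_fresh_newRoles m2 []).1
      have hcont : ∀ x, (solveB (L.take mid)).2.contains x = decide (x ∈ u1) := by
        intro x
        rw [PySem.Dict.contains_eq_decide_mem_keys, hkeys]
      -- the combined new-role list
      have hcomb : newRoles [] (L.map roleOf)
          = u1 ++ u2.filter (fun x => decide (x ∉ u1)) := by
        rw [hsplit, newRoles_append, ← hu1]
        congr 1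
        rw [List.nil_append, newRoles_seen_filter, ← hu2]
      -- unfold one step of solveB on L
      have hstep : solveB L =
          ((solveB (L.drop mid)).2.items).foldl
            (fun (acc : Int × PySem.Dict String Int) p =>
              if (solveB (L.take mid)).2.contains p.1 then acc
              else (acc.1 + p.2, acc.2.insert p.1 p.2))
            ((solveB (L.take mid)).1, (solveB (L.take mid)).2) := by
        conv_lhs => rw [hL, solveB]
      have hndkeys : (((solveB (L.drop mid)).2.items).map (·.1)).Nodup := by
        rw [hr2]; simpa [List.map_map, Function.comp_def] using hnodupu2
      have hmf := merge_fold (solveB (L.take mid)).2 ((solveB (L.drop mid)).2.items)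
        (solveB (L.take mid)).1 (solveB (L.take mid)).2 hndkeys (fun p _ h => h)
      -- rewrite the filtered items through u2
      have hfilter : ((solveB (L.drop mid)).2.items).filter
            (fun p => !((solveB (L.take mid)).2.contains p.1))
          = (u2.filter (fun x => decide (x ∉ u1))).map (fun r => (r, scoreOf r)) := by
        rw [hr2, List.filter_map]
        congr 1
        apply List.filter_congr
        intro x _
        simp [Function.comp, hcont, decide_not]
      constructor
      · rw [hstep, hmf.1, hfilter, hl1, hcomb]
        simp [List.map_map, Function.comp_def]
      · rw [hstep, hmf.2, hfilter, hl2, hcomb]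
        simp

-- ===== VERDICT (by name: the statement is the Claim_ definition above) =====
theorem score_organizations_spec : Claim_equal_score_organizations := by
  intro orgs _
  unfold Spec_score_organizations score_organizations score_organizations_alt
  have hfold : orgs.foldl
      (fun (st : Int × PySem.Dict String Int × PySem.Set String) org =>
        let role := roleOf org
        if st.2.2.contains role then st
        else
          let points := ORG_ROLE_SCORES.getD role (ORG_ROLE_SCORES.getD "Other" 0)
          (st.1 + points, st.2.1.insert role points, PySem.Set.add st.2.2 role))
      (0, PySem.Dict.empty, PySem.Set.empty)
      = (orgs.map roleOf).foldl stepA (0, PySem.Dict.empty, PySem.Set.empty) := by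
    rw [List.foldl_map]; rfl
  obtain ⟨hn, _⟩ := nodup_fresh_newRoles (orgs.map roleOf) PySem.Set.empty
  have hitems := items_foldl_insert (newRoles PySem.Set.empty (orgs.map roleOf))
    PySem.Dict.empty hn (fun r _ => PySem.Dict.contains_empty r)
  obtain ⟨hb1, hb2⟩ := solveB_spec orgs.length orgs (le_refl _)
  rw [hfold, loopA_eq]
  simp only [hitems]
  have he : (PySem.Set.empty : PySem.Set String) = [] := rfl
  refine Prod.ext ?_ ?_
  · simp [hb1]
  · simp [hb2, PySem.Dict.empty]
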